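-- pv_equiv track=rewrite | github.com/roni5/AlgorithmPractice | Pramp/busiestTimeInTheMall.py | findBusiestTime
-- ===== SOURCE A (Python) =====
-- def findBusiestTime(data):
--     count = 0
--     currentMaxPeople = float('-inf')
--     maxTime = 0
--
--     for i in range(len(data)):
--         enter = True if data[i][2] == 1 else False
--         time = data[i][0]
--         customerNum = data[i][1]
--
--         if enter:
--             count += customerNum
--         else:
--             count -= customerNum
--
--         if i < len(data) - 1 and time == data[i + 1][0]:
--             continue
--
--         if count > currentMaxPeople:
--             currentMaxPeople = count
--             maxTime = time
--
--     return maxTime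
-- ===== SOURCE B (Python) =====
-- def findBusiestTime(data):
--     # Backward sweep: walk the events right-to-left, keeping the best candidate of the
--     # suffix with its count RELATIVE to the suffix start; prepending an event shifts the
--     # stored count by that event's delta, so no global running occupancy is ever kept.
--     best = None        # (count relative to current suffix start, time)
--     prev_time = None   # timestamp of the event to the right
--     for e in reversed(data):
--         d = e[1] if e[2] == 1 else -e[1]
--         if best is not None:
--             best = (best[0] + d, best[1])
--         if prev_time is None or e[0] != prev_time:
--             # this event closes a run of equal timestamps: it is a candidate;
--             # '>=' keeps the leftmost maximum, matching the forward first-peak rule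
--             if best is None or d >= best[0]:
--                 best = (d, e[0])
--         prev_time = e[0]
--     return best[1] if best else 0
-- ===== Notes on version B (the rewrite author's own statement) =====
-- stated objective: alternative
-- what changed: A sweeps forward with a global running occupancy count and an in-loop running max; B builds the answer back-to-front: it walks the events right-to-left keeping only the best candidate of the suffix with its count relative to the suffix start, shifting that count by each prepended event's delta, so no global occupancy count or running max over the whole prefix is ever maintained.
import Mathlib
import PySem

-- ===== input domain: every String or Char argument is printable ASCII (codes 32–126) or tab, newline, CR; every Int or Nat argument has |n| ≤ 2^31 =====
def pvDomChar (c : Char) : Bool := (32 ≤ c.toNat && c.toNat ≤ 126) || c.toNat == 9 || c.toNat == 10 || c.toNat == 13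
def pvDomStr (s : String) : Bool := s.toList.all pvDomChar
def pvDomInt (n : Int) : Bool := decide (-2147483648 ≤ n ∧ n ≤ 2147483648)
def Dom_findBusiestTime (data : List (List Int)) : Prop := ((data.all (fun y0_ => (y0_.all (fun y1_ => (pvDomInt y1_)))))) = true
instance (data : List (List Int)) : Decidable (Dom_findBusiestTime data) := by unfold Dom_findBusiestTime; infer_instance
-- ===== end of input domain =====

-- B replaces A's forward sweep (global running count + running max) by a backward sweep that
-- keeps only the suffix's best candidate with a suffix-relative count, shifted per event;
-- same values, no speed claim.

-- ===== PORT A =====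
-- A's loop: state (count, currentMaxPeople, maxTime); float('-inf') is `none : Option Int`
-- (count is always an int, so `count > -inf` is the `none => true` branch).
def findBusiestTime (data : List (List Int)) : Int :=
  ((PySem.List.pyRange 0 (PySem.List.len data) 1).foldl
    (fun (st : Int × Option Int × Int) i =>
      let row := PySem.List.pyGetD data i []
      let enter : Bool := PySem.List.pyGetD row 2 0 == 1
      let time := PySem.List.pyGetD row 0 0
      let customerNum := PySem.List.pyGetD row 1 0
      let count := if enter then st.1 + customerNum else st.1 - customerNum
      if i < PySem.List.len data - 1 ∧ time = PySem.List.pyGetD (PySem.List.pyGetD data (i + 1) []) 0 0 then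
        (count, st.2.1, st.2.2)
      else
        if (match st.2.1 with | none => true | some m => decide (m < count)) then
          (count, some count, time)
        else
          (count, st.2.1, st.2.2))
    (0, none, 0)).2.2

-- ===== PORT B =====
-- Source B: loop over reversed(data) with state (best : Option (count,time), prev_time : Option Int);
-- `for e in reversed(data)` is a foldl over data.reverse.
def findBusiestTime_alt (data : List (List Int)) : Int :=
  let st := data.reverse.foldl
    (fun (st : Option (Int × Int) × Option Int) e =>
      let d := if PySem.List.pyGetD e 2 0 == 1 then PySem.List.pyGetD e 1 0 else -PySem.List.pyGetD e 1 0
      let best := st.1.map (fun p => (p.1 + d, p.2))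
      let best :=
        if (match st.2 with | none => true | some t => PySem.List.pyGetD e 0 0 ≠ t) then
          match best with
          | none => some (d, PySem.List.pyGetD e 0 0)
          | some p => if p.1 ≤ d then some (d, PySem.List.pyGetD e 0 0) else some p
        else best
      (best, some (PySem.List.pyGetD e 0 0)))
    (none, none)
  match st.1 with
  | none => 0
  | some p => p.2

-- ===== PRECONDITION & SPEC =====
-- Pre_ excludes exactly the inputs where the Python A raises IndexError: a row with fewer
-- than three entries (both programs read e[0], e[1], e[2]).
def Pre_findBusiestTime (data : List (List Int)) : Prop := ∀ e ∈ data, 3 ≤ e.length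
instance (data : List (List Int)) : Decidable (Pre_findBusiestTime data) := by unfold Pre_findBusiestTime; infer_instance
def pvWitness_findBusiestTime : List (List Int) := [[1, 2, 1], [1, 1, 0], [2, 3, 1], [3, 3, 0]]
def Spec_findBusiestTime (data : List (List Int)) (out : Int) : Prop := out = findBusiestTime_alt data
instance (data : List (List Int)) (out : Int) : Decidable (Spec_findBusiestTime data out) := by unfold Spec_findBusiestTime; infer_instance

-- ===== CLAIM (what is proved, stated in full; the proofs are below) =====
def Claim_equal_findBusiestTime : Prop := ∀ (data : List (List Int)), Dom_findBusiestTime data → Pre_findBusiestTime data → Spec_findBusiestTime data (findBusiestTime data)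

-- ===== LEMMAS AND PROOFS =====

-- row accessors shared by the proof-side recursions
def pvTime (e : List Int) : Int := PySem.List.pyGetD e 0 0
def pvDelta (e : List Int) : Int :=
  if PySem.List.pyGetD e 2 0 == 1 then PySem.List.pyGetD e 1 0 else -PySem.List.pyGetD e 1 0

-- A's loop body, named (definitionally the lambda inside findBusiestTime; lets zeta-expanded)
def pvCount (e : List Int) (c : Int) : Int :=
  if PySem.List.pyGetD e 2 0 == 1 then c + PySem.List.pyGetD e 1 0 else c - PySem.List.pyGetD e 1 0

def pvBodyA (data : List (List Int)) (st : Int × Option Int × Int) (i : Int) : Int × Option Int × Int :=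
  if i < PySem.List.len data - 1 ∧
      PySem.List.pyGetD (PySem.List.pyGetD data i []) 0 0
        = PySem.List.pyGetD (PySem.List.pyGetD data (i + 1) []) 0 0 then
    (pvCount (PySem.List.pyGetD data i []) st.1, st.2.1, st.2.2)
  else
    if (match st.2.1 with | none => true | some m => decide (m < pvCount (PySem.List.pyGetD data i []) st.1)) then
      (pvCount (PySem.List.pyGetD data i []) st.1, some (pvCount (PySem.List.pyGetD data i []) st.1),
        PySem.List.pyGetD (PySem.List.pyGetD data i []) 0 0)
    else
      (pvCount (PySem.List.pyGetD data i []) st.1, st.2.1, st.2.2)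

-- A's loop as structural recursion on the remaining suffix
def pvGoA : List (List Int) → Int × Option Int × Int → Int × Option Int × Int
  | [], st => st
  | e :: rest, st =>
    let count := st.1 + pvDelta e
    let nextSame : Bool := match rest with | [] => false | r :: _ => pvTime e == pvTime r
    if nextSame then pvGoA rest (count, st.2.1, st.2.2)
    else
      if (match st.2.1 with | none => true | some m => decide (m < count)) then
        pvGoA rest (count, some count, pvTime e)
      else
        pvGoA rest (count, st.2.1, st.2.2)

-- run-boundary candidates (count at boundary, its time), starting from running sum s
def pvPk : Int → List (List Int) → List (Int × Int)
  | _, [] => []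
  | s, e :: rest =>
    let c := s + pvDelta e
    match rest with
    | [] => [(c, pvTime e)]
    | r :: _ => if pvTime e = pvTime r then pvPk c rest else (c, pvTime e) :: pvPk c rest

-- A's running-max over the candidate list
def pvScan : List (Int × Int) → Option Int → Int → Int
  | [], _, mt => mt
  | (c, t) :: rest, cur, mt =>
    if (match cur with | none => true | some m => decide (m < c)) then pvScan rest (some c) t
    else pvScan rest cur mt

-- the leftmost maximal candidate, computed from the right
def pvFirstMax : List (Int × Int) → Option (Int × Int)
  | [] => none
  | (c, t) :: rest =>
    match pvFirstMax rest with
    | none => some (c, t)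
    | some p => if p.1 ≤ c then some (c, t) else some p

-- B's loop as structural recursion (best of the suffix, suffix-relative counts)
def pvGoB : List (List Int) → Option (Int × Int)
  | [] => none
  | e :: rest =>
    let d := pvDelta e
    let b := (pvGoB rest).map (fun p => (p.1 + d, p.2))
    let boundary : Bool := match rest with | [] => true | r :: _ => pvTime e != pvTime r
    if boundary then
      match b with
      | none => some (d, pvTime e)
      | some p => if p.1 ≤ d then some (d, pvTime e) else some p
    else b

def pvFirstT : List (List Int) → Option Int
  | [] => none
  | e :: _ => some (pvTime e)

lemma pvCount_eq (e : List Int) (c : Int) : pvCount e c = c + pvDelta e := by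
  unfold pvCount pvDelta; split <;> ring

lemma pvGetD_append_length (pre : List (List Int)) (e : List Int) (suf : List (List Int)) :
    PySem.List.pyGetD (pre ++ e :: suf) (pre.length : Int) [] = e := by
  simp [PySem.List.pyGetD_natCast, List.getD]

lemma pvLoopA (pre suf : List (List Int)) (st : Int × Option Int × Int) :
    (PySem.List.pyRange (pre.length : Int) (((pre ++ suf).length : Int)) 1).foldl
        (pvBodyA (pre ++ suf)) st = pvGoA suf st := by
  induction suf generalizing pre st with
  | nil =>
    rw [PySem.List.pyRange_one_eq_nil (by simp)]
    rfl
  | cons e rest ih =>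
    rw [PySem.List.pyRange_one_cons (by simp; try omega)]
    rw [List.foldl_cons]
    have hget := pvGetD_append_length pre e rest
    have hrange : PySem.List.pyRange ((pre.length : Int) + 1) (((pre ++ e :: rest).length : Nat) : Int) 1
        = PySem.List.pyRange ((((pre ++ [e]).length : Nat)) : Int) ((((pre ++ [e]) ++ rest).length : Nat) : Int) 1 := by
      have h1 : ((pre.length : Int) + 1) = (((pre ++ [e]).length : Nat) : Int) := by simp
      have h2 : pre ++ e :: rest = (pre ++ [e]) ++ rest := by simp
      rw [h1, h2]
    have hfun : pvBodyA (pre ++ e :: rest) = pvBodyA ((pre ++ [e]) ++ rest) := by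
      rw [show pre ++ e :: rest = (pre ++ [e]) ++ rest from by simp]
    cases rest with
    | nil =>
      have hbody : pvBodyA (pre ++ [e]) st (pre.length : Int)
          = (if (match st.2.1 with | none => true | some m => decide (m < st.1 + pvDelta e)) then
               (st.1 + pvDelta e, some (st.1 + pvDelta e), pvTime e)
             else
               (st.1 + pvDelta e, st.2.1, st.2.2)) := by
        unfold pvBodyA
        rw [hget, pvCount_eq]
        have hcond : ¬ ((pre.length : Int) < PySem.List.len (pre ++ [e]) - 1 ∧
            PySem.List.pyGetD e 0 0 = PySem.List.pyGetD (PySem.List.pyGetD (pre ++ [e]) ((pre.length : Int) + 1) []) 0 0) := by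
          rintro ⟨h1, -⟩
          rw [PySem.List.len_eq] at h1
          simp only [List.length_append, List.length_cons, List.length_nil] at h1
          omega
        rw [if_neg hcond]
        rfl
      rw [hbody, hrange, hfun]
      unfold pvGoA
      simp only
      cases hcur : st.2.1 with
      | none => exact ih (pre ++ [e]) _
      | some m =>
        by_cases hlt2 : m < st.1 + pvDelta e
        · have hd : (decide (m < st.1 + pvDelta e)) = true := by simp [hlt2]
          simp only [hd]
          exact ih (pre ++ [e]) _
        · have hd : (decide (m < st.1 + pvDelta e)) = false := by simp [hlt2]
          simp only [hd, Bool.false_eq_true, if_false]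
          exact ih (pre ++ [e]) _
    | cons r rs =>
      have hnext : PySem.List.pyGetD (pre ++ e :: r :: rs) ((pre.length : Int) + 1) [] = r := by
        have h1 : ((pre.length : Int) + 1) = (((pre ++ [e]).length : Nat) : Int) := by
          simp
        have h2 : pre ++ e :: r :: rs = (pre ++ [e]) ++ r :: rs := by simp
        rw [h1, h2]
        exact pvGetD_append_length (pre ++ [e]) r rs
      have hlt : (pre.length : Int) < PySem.List.len (pre ++ e :: r :: rs) - 1 := by
        rw [PySem.List.len_eq]
        simp only [List.length_append, List.length_cons]
        push_cast
        omega
      have hbody : pvBodyA (pre ++ e :: r :: rs) st (pre.length : Int)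
          = (if (pvTime e == pvTime r : Bool) then
               (st.1 + pvDelta e, st.2.1, st.2.2)
             else
               if (match st.2.1 with | none => true | some m => decide (m < st.1 + pvDelta e)) then
                 (st.1 + pvDelta e, some (st.1 + pvDelta e), pvTime e)
               else
                 (st.1 + pvDelta e, st.2.1, st.2.2)) := by
        unfold pvBodyA
        rw [hget, pvCount_eq, hnext]
        by_cases ht : pvTime e = pvTime r
        · rw [if_pos ⟨hlt, ht⟩]
          have hb : (pvTime e == pvTime r) = true := by simp [ht]
          rw [hb, if_pos rfl]
        · rw [if_neg (by rintro ⟨-, h2⟩; exact ht h2)]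
          have hb : (pvTime e == pvTime r) = false := by simp [ht]
          rw [hb]
          rfl
      rw [hbody, hrange, hfun]
      unfold pvGoA
      simp only
      by_cases ht2 : pvTime e = pvTime r
      · have hb2 : (pvTime e == pvTime r) = true := by simp [ht2]
        simp only [hb2]
        exact ih (pre ++ [e]) _
      · have hb2 : (pvTime e == pvTime r) = false := by simp [ht2]
        simp only [hb2, Bool.false_eq_true, if_false]
        cases hcur : st.2.1 with
        | none => exact ih (pre ++ [e]) _
        | some m =>
          by_cases hlt2 : m < st.1 + pvDelta e
          · have hd : (decide (m < st.1 + pvDelta e)) = true := by simp [hlt2]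
            simp only [hd]
            exact ih (pre ++ [e]) _
          · have hd : (decide (m < st.1 + pvDelta e)) = false := by simp [hlt2]
            simp only [hd, Bool.false_eq_true, if_false]
            exact ih (pre ++ [e]) _

lemma pvGoA_scan (l : List (List Int)) (s : Int) (cur : Option Int) (mt : Int) :
    (pvGoA l (s, cur, mt)).2.2 = pvScan (pvPk s l) cur mt := by
  induction l generalizing s cur mt with
  | nil => rfl
  | cons e rest ih =>
    unfold pvGoA pvPk
    cases rest with
    | nil =>
      cases cur with
      | none => simp [pvGoA, pvScan]
      | some m => by_cases h : m < s + pvDelta e <;> simp [pvGoA, pvScan, h]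
    | cons r rs =>
      by_cases ht : pvTime e = pvTime r
      · simp [ht, ih]
      · have hb : (pvTime e == pvTime r) = false := by simp [ht]
        cases cur with
        | none => simp [hb, ht, pvScan, ih]
        | some m => by_cases h : m < s + pvDelta e <;> simp [hb, ht, h, pvScan, ih]

-- forward running-max with strict '>' picks the same element as the right-to-left pvFirstMax
lemma pvScan_some (l : List (Int × Int)) (m mt : Int) :
    pvScan l (some m) mt
      = (match pvFirstMax l with
         | none => mt
         | some p => if m < p.1 then p.2 else mt) := by
  induction l generalizing m mt with
  | nil => rfl
  | cons c rest ih =>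
    obtain ⟨cv, ct⟩ := c
    by_cases h : m < cv
    · simp only [pvScan, h, decide_true, if_pos, ih, pvFirstMax]
      cases hf : pvFirstMax rest with
      | none => simp [h]
      | some p =>
        by_cases h2 : p.1 ≤ cv
        · have : ¬ cv < p.1 := by omega
          simp [h2, h, this]
        · have h3 : cv < p.1 := by omega
          have h4 : m < p.1 := by omega
          simp [h2, h3, h4]
    · simp only [pvScan, h, decide_false, Bool.false_eq_true, if_false, ih, pvFirstMax]
      cases hf : pvFirstMax rest with
      | none => simp [h]
      | some p =>
        by_cases h2 : p.1 ≤ cv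
        · have h4 : ¬ m < p.1 := by omega
          simp [h2, h, h4]
        · simp [h2]

lemma pvScan_firstMax (l : List (Int × Int)) :
    pvScan l none 0
      = (match pvFirstMax l with | none => 0 | some p => p.2) := by
  cases l with
  | nil => rfl
  | cons c rest =>
    obtain ⟨cv, ct⟩ := c
    have h1 : pvScan ((cv, ct) :: rest) none 0 = pvScan rest (some cv) ct := rfl
    rw [h1, pvScan_some, pvFirstMax]
    cases hf : pvFirstMax rest with
    | none => rfl
    | some p =>
      by_cases h2 : p.1 ≤ cv
      · have : ¬ cv < p.1 := by omega
        simp [h2, this]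
      · have h3 : cv < p.1 := by omega
        simp [h2, h3]

-- B's recursion computes the leftmost maximal candidate: suffix-relative counts, shifted by s
lemma pvGoB_firstMax (l : List (List Int)) (s : Int) :
    pvFirstMax (pvPk s l) = (pvGoB l).map (fun p => (p.1 + s, p.2)) := by
  induction l generalizing s with
  | nil => rfl
  | cons e rest ih =>
    cases rest with
    | nil =>
      have hR : pvGoB [e] = some (pvDelta e, pvTime e) := rfl
      have hL : pvPk s [e] = [(s + pvDelta e, pvTime e)] := rfl
      rw [hR, hL]
      simp only [pvFirstMax, Option.map_some, Option.some.injEq, Prod.mk.injEq]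
      exact ⟨by ring, trivial⟩
    | cons r rs =>
      have hPk : pvPk s (e :: r :: rs)
          = (if pvTime e = pvTime r then pvPk (s + pvDelta e) (r :: rs)
             else (s + pvDelta e, pvTime e) :: pvPk (s + pvDelta e) (r :: rs)) := rfl
      have hB : pvGoB (e :: r :: rs)
          = (if (pvTime e != pvTime r) = true then
               match (pvGoB (r :: rs)).map (fun p => (p.1 + pvDelta e, p.2)) with
               | none => some (pvDelta e, pvTime e)
               | some p => if p.1 ≤ pvDelta e then some (pvDelta e, pvTime e) else some p
             else (pvGoB (r :: rs)).map (fun p => (p.1 + pvDelta e, p.2))) := rfl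
      rw [hPk, hB]
      by_cases ht : pvTime e = pvTime r
      · have hb : (pvTime e != pvTime r) = false := by simp [ht]
        rw [if_pos ht, hb]
        simp only [Bool.false_eq_true, if_false]
        rw [ih (s + pvDelta e)]
        cases pvGoB (r :: rs) with
        | none => rfl
        | some q =>
          simp only [Option.map_some, Option.some.injEq, Prod.mk.injEq]
          exact ⟨by ring, trivial⟩
      · have hb : (pvTime e != pvTime r) = true := by simp [ht]
        rw [if_neg ht, hb, if_pos rfl]
        have hF : pvFirstMax ((s + pvDelta e, pvTime e) :: pvPk (s + pvDelta e) (r :: rs))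
            = (match pvFirstMax (pvPk (s + pvDelta e) (r :: rs)) with
               | none => some (s + pvDelta e, pvTime e)
               | some p => if p.1 ≤ s + pvDelta e then some (s + pvDelta e, pvTime e) else some p) := rfl
        rw [hF, ih (s + pvDelta e)]
        cases pvGoB (r :: rs) with
        | none =>
          simp only [Option.map_none, Option.map_some, Option.some.injEq, Prod.mk.injEq]
          exact ⟨by ring, trivial⟩
        | some q =>
          simp only [Option.map_some]
          by_cases hq : q.1 ≤ 0
          · have h1 : q.1 + (s + pvDelta e) ≤ s + pvDelta e := by omega
            have h2 : q.1 + pvDelta e ≤ pvDelta e := by omega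
            simp only [h1, h2, if_pos, Option.map_some, Option.some.injEq, Prod.mk.injEq]
            exact ⟨by ring, trivial⟩
          · have h1 : ¬ q.1 + (s + pvDelta e) ≤ s + pvDelta e := by omega
            have h2 : ¬ q.1 + pvDelta e ≤ pvDelta e := by omega
            simp only [h1, h2, if_false, Option.map_some, Option.some.injEq, Prod.mk.injEq]
            exact ⟨by ring, trivial⟩

-- B's foldl over the reversed list tracks exactly (pvGoB, first timestamp)
lemma pvB_fold (l : List (List Int)) :
    l.reverse.foldl
      (fun (st : Option (Int × Int) × Option Int) e =>
        let d := if PySem.List.pyGetD e 2 0 == 1 then PySem.List.pyGetD e 1 0 else -PySem.List.pyGetD e 1 0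
        let best := st.1.map (fun p => (p.1 + d, p.2))
        let best :=
          if (match st.2 with | none => true | some t => PySem.List.pyGetD e 0 0 ≠ t) then
            match best with
            | none => some (d, PySem.List.pyGetD e 0 0)
            | some p => if p.1 ≤ d then some (d, PySem.List.pyGetD e 0 0) else some p
          else best
        (best, some (PySem.List.pyGetD e 0 0)))
      (none, none)
    = (pvGoB l, pvFirstT l) := by
  induction l with
  | nil => rfl
  | cons e rest ih =>
    rw [List.reverse_cons, List.foldl_append, ih, List.foldl_cons, List.foldl_nil]
    cases rest with
    | nil => rfl
    | cons r rs =>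
      show ((if (decide (pvTime e ≠ pvTime r)) = true then
              match (pvGoB (r :: rs)).map (fun p => (p.1 + pvDelta e, p.2)) with
              | none => some (pvDelta e, pvTime e)
              | some p => if p.1 ≤ pvDelta e then some (pvDelta e, pvTime e) else some p
            else (pvGoB (r :: rs)).map (fun p => (p.1 + pvDelta e, p.2))), some (pvTime e))
          = (pvGoB (e :: r :: rs), pvFirstT (e :: r :: rs))
      have hB : pvGoB (e :: r :: rs)
          = (if (pvTime e != pvTime r) = true then
               match (pvGoB (r :: rs)).map (fun p => (p.1 + pvDelta e, p.2)) with
               | none => some (pvDelta e, pvTime e)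
               | some p => if p.1 ≤ pvDelta e then some (pvDelta e, pvTime e) else some p
             else (pvGoB (r :: rs)).map (fun p => (p.1 + pvDelta e, p.2))) := rfl
      have hcond : (decide (pvTime e ≠ pvTime r)) = (pvTime e != pvTime r) := by
        by_cases h : pvTime e = pvTime r <;> simp [h]
      rw [hB, hcond]
      rfl

lemma pvA_eq_goA (data : List (List Int)) :
    findBusiestTime data = (pvGoA data (0, none, 0)).2.2 := by
  have h0 : findBusiestTime data
      = ((PySem.List.pyRange 0 (PySem.List.len data) 1).foldl (pvBodyA data) (0, none, 0)).2.2 := rfl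
  rw [h0]
  have h1 : (PySem.List.pyRange 0 (PySem.List.len data) 1).foldl (pvBodyA data) (0, none, 0)
      = pvGoA data (0, none, 0) := by
    have := pvLoopA [] data (0, none, 0)
    simpa [PySem.List.len_eq] using this
  rw [h1]

lemma pvB_eq (data : List (List Int)) :
    findBusiestTime_alt data
      = (match pvFirstMax (pvPk 0 data) with | none => 0 | some p => p.2) := by
  unfold findBusiestTime_alt
  rw [pvB_fold, pvGoB_firstMax data 0]
  cases pvGoB data with
  | none => rfl
  | some p => rfl

-- ===== VERDICT (by name: the statement is the Claim_ definition above) =====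
theorem findBusiestTime_spec : Claim_equal_findBusiestTime := by
  intro data _ _
  unfold Spec_findBusiestTime
  rw [pvA_eq_goA, pvGoA_scan, pvScan_firstMax, pvB_eq]
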